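-- pv_equiv track=rewrite | github.com/gpark/work | work.py | IsSubKey
-- ===== SOURCE A (Python) =====
-- def IsSubKey(key, keySize):
--     end = len(key) - 1
--     endPtr = end
--     ptr = len(key) - 1 - keySize
--
--     while (endPtr > keySize and key[endPtr] == key[ptr]):
--         ptr = ptr - 1
--         endPtr = endPtr - 1
--
--     return endPtr == keySize and key[endPtr] == key[ptr]
-- ===== SOURCE B (Python) =====
-- def IsSubKey(key, keySize):
--     n = len(key)
--     if keySize >= n:
--         return False
--     if keySize == 0:
--         return True
--     return key[keySize:] == key[:-keySize]
-- ===== Notes on version B (the rewrite author's own statement) =====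
-- stated objective: simpler
-- what changed: Replaces the two-pointer descending while loop with a single slice equality key[keySize:] == key[:-keySize] (keySize >= len(key) and keySize == 0 handled explicitly); the per-character interpreter loop becomes one C-level slice comparison.
import Mathlib
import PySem

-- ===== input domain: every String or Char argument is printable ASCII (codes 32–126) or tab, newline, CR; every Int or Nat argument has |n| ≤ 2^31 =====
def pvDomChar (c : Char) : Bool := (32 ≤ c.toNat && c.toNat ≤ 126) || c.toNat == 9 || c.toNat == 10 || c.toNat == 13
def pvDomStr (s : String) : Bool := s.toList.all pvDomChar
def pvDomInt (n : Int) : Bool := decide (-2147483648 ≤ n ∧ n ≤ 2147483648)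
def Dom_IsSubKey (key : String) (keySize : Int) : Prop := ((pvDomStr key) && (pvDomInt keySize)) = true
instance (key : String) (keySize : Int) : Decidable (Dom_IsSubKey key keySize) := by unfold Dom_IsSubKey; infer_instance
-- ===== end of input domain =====

-- B replaces A's two-pointer descending while loop by a single slice equality (simpler; same O(n) cost).


-- ===== PORT A =====
-- the while loop: decrement both pointers while endPtr > keySize and key[endPtr] == key[ptr];
-- fuel bounds the iteration count (the loop runs at most (end - keySize) times)
def IsSubKeyLoop (l : List Char) (keySize : Int) (endPtr ptr : Int) : Nat → Int × Int
  | 0 => (endPtr, ptr)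
  | f + 1 =>
    if (decide (endPtr > keySize)) && (PySem.List.pyGet? l endPtr == PySem.List.pyGet? l ptr) then
      IsSubKeyLoop l keySize (endPtr - 1) (ptr - 1) f
    else (endPtr, ptr)

def IsSubKey (key : String) (keySize : Int) : Bool :=
  let l := key.toList
  let «end» : Int := PySem.Str.len key - 1
  let r := IsSubKeyLoop l keySize «end» (PySem.Str.len key - 1 - keySize) («end» - keySize).toNat
  (r.1 == keySize) && (PySem.List.pyGet? l r.1 == PySem.List.pyGet? l r.2)

-- ===== PORT B =====
def IsSubKey_alt (key : String) (keySize : Int) : Bool :=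
  let l := key.toList
  let n : Int := PySem.Str.len key
  if keySize ≥ n then false
  else if keySize = 0 then true
  else PySem.List.slice l (some keySize) none == PySem.List.slice l none (some (-keySize))

-- ===== PRECONDITION & SPEC =====
-- Pre_ excludes exactly the inputs where A raises IndexError: every keySize < 0.
def Pre_IsSubKey (_key : String) (keySize : Int) : Prop := 0 ≤ keySize
instance (key : String) (keySize : Int) : Decidable (Pre_IsSubKey key keySize) := by unfold Pre_IsSubKey; infer_instance
def pvWitness_IsSubKey : String × Int := ("abcab", 3)

def Spec_IsSubKey (key : String) (keySize : Int) (out : Bool) : Prop := out = IsSubKey_alt key keySize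
instance (key : String) (keySize : Int) (out : Bool) : Decidable (Spec_IsSubKey key keySize out) := by unfold Spec_IsSubKey; infer_instance

-- ===== CLAIM (what is proved, stated in full; the proofs are below) =====
def Claim_equal_IsSubKey : Prop := ∀ (key : String) (keySize : Int), Dom_IsSubKey key keySize → Pre_IsSubKey key keySize → Spec_IsSubKey key keySize (IsSubKey key keySize)

-- ===== LEMMAS AND PROOFS =====

-- keySize = 0: every comparison is key[e] == key[e], so the loop walks all the way down to 0
lemma loop_zero (l : List Char) : ∀ f : Nat, IsSubKeyLoop l 0 (f : Int) (f : Int) f = (0, 0) := by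
  intro f
  induction f with
  | zero => simp [IsSubKeyLoop]
  | succ f ih =>
    have h1 : ((f : Int) + 1) - 1 = (f : Int) := by omega
    simp [IsSubKeyLoop, Nat.cast_succ, h1, ih]

-- 0 < k: descending from endPtr = k+m, ptr = m with fuel m, the returned final test equals
-- the conjunction of the comparisons l[k+j] == l[j] for j = 0..m
lemma loop_pos (l : List Char) (k : Nat) : ∀ m : Nat, k + m < l.length →
    (let r := IsSubKeyLoop l (k : Int) ((k : Int) + (m : Int)) ((m : Int)) m
     (r.1 == (k : Int)) && (PySem.List.pyGet? l r.1 == PySem.List.pyGet? l r.2))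
    = (List.range (m + 1)).all (fun j => l[k + j]? == l[j]?) := by
  intro m
  induction m with
  | zero =>
    intro _
    simp [IsSubKeyLoop, PySem.List.pyGet?_natCast, PySem.List.pyGet?_zero]
  | succ m ih =>
    intro hlen
    simp only [Nat.cast_add, Nat.cast_one]
    have hgt : decide ((k : Int) + ((m : Int) + 1) > (k : Int)) = true := by simp
    by_cases h : (PySem.List.pyGet? l ((k : Int) + ((m : Int) + 1)) == PySem.List.pyGet? l ((m : Int) + 1)) = true
    · -- comparison succeeds: one more loop step
      have hstep : IsSubKeyLoop l (k : Int) ((k : Int) + ((m : Int) + 1)) ((m : Int) + 1) (m + 1)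
          = IsSubKeyLoop l (k : Int) ((k : Int) + (m : Int)) ((m : Int)) m := by
        have e1 : ((k : Int) + ((m : Int) + 1)) - 1 = (k : Int) + (m : Int) := by ring
        have e2 : ((m : Int) + 1) - 1 = (m : Int) := by ring
        simp only [IsSubKeyLoop, hgt, h, Bool.and_self, if_true, e1, e2]
      have hterm : (l[k + (m + 1)]? == l[m + 1]?) = true := by
        have e1 : ((k : Int) + ((m : Int) + 1)) = (((k + (m + 1) : Nat) : Int)) := by push_cast; ring
        have e2 : ((m : Int) + 1) = (((m + 1 : Nat) : Int)) := by push_cast; ring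
        rw [e1, e2, PySem.List.pyGet?_natCast, PySem.List.pyGet?_natCast] at h
        exact h
      rw [hstep, ih (by omega)]
      rw [List.range_succ (n := m + 1), List.all_append]
      simp [hterm]
    · -- comparison fails: loop returns here and the final endPtr == keySize test is false
      rw [Bool.not_eq_true] at h
      have hret : IsSubKeyLoop l (k : Int) ((k : Int) + ((m : Int) + 1)) ((m : Int) + 1) (m + 1)
          = ((k : Int) + ((m : Int) + 1), (m : Int) + 1) := by
        simp only [IsSubKeyLoop, hgt, h, Bool.true_and, Bool.false_eq_true, if_false]
      have hterm : (l[k + (m + 1)]? == l[m + 1]?) = false := by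
        have e1 : ((k : Int) + ((m : Int) + 1)) = (((k + (m + 1) : Nat) : Int)) := by push_cast; ring
        have e2 : ((m : Int) + 1) = (((m + 1 : Nat) : Int)) := by push_cast; ring
        rw [e1, e2, PySem.List.pyGet?_natCast, PySem.List.pyGet?_natCast] at h
        exact h
      rw [hret]
      have hne : (((k : Int) + ((m : Int) + 1)) == (k : Int)) = false := by
        simp only [beq_eq_false_iff_ne, ne_eq]; omega
      rw [List.range_succ (n := m + 1), List.all_append]
      simp [hne, hterm]

-- the conjunction of comparisons l[k+j] == l[j], j < n-k, is exactly the slice equality drop k = take (n-k)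
lemma all_eq_slice (l : List Char) (k : Nat) (hkn : k < l.length) :
    (List.range (l.length - k)).all (fun j => l[k + j]? == l[j]?)
    = (l.drop k == l.take (l.length - k)) := by
  rw [Bool.eq_iff_iff]
  simp only [List.all_eq_true, List.mem_range, beq_iff_eq]
  constructor
  · intro h
    apply List.ext_getElem?
    intro j
    rw [List.getElem?_drop, List.getElem?_take]
    by_cases hj : j < l.length - k
    · rw [if_pos hj]; exact h j hj
    · rw [if_neg hj]
      apply List.getElem?_eq_none
      omega
  · intro h j hj
    have := congrArg (fun xs => xs[j]?) h
    simp only [List.getElem?_drop, List.getElem?_take, if_pos hj] at this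
    exact this

-- the whole equality, stated over the underlying character list
lemma main_eq (l : List Char) (keySize : Int) (hpre : 0 ≤ keySize) :
    (let r := IsSubKeyLoop l keySize ((l.length : Int) - 1) ((l.length : Int) - 1 - keySize) (((l.length : Int) - 1 - keySize)).toNat
     (r.1 == keySize) && (PySem.List.pyGet? l r.1 == PySem.List.pyGet? l r.2))
    = (if keySize ≥ (l.length : Int) then false
       else if keySize = 0 then true
       else PySem.List.slice l (some keySize) none == PySem.List.slice l none (some (-keySize))) := by
  simp only
  by_cases hbig : keySize ≥ (l.length : Int)
  · -- keySize ≥ n: fuel is 0, loop does not move, endPtr = n-1 ≠ keySize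
    have hfuel : ((l.length : Int) - 1 - keySize).toNat = 0 := by omega
    have hne : (((l.length : Int) - 1) == keySize) = false := by
      simp only [beq_eq_false_iff_ne, ne_eq]; omega
    simp [hfuel, IsSubKeyLoop, hne, hbig]
  · rw [not_le] at hbig
    rw [if_neg (by omega)]
    by_cases h0 : keySize = 0
    · -- keySize = 0: loop descends to (0,0), final test true
      subst h0
      have e0 : (l.length : Int) - 1 - 0 = (l.length : Int) - 1 := by ring
      have e1 : (l.length : Int) - 1 = (((l.length - 1 : Nat)) : Int) := by omega
      have e2 : ((((l.length - 1 : Nat)) : Int)).toNat = l.length - 1 := by omega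
      rw [if_pos rfl, e0, e1, e2, loop_zero l (l.length - 1)]
      simp
    · -- 0 < keySize < n
      rw [if_neg h0]
      lift keySize to Nat using hpre with k
      have hk0 : 0 < k := by omega
      have hkl : k < l.length := by omega
      set m : Nat := l.length - 1 - k with hm
      have hmk : k + m < l.length := by omega
      rw [show ((l.length : Int) - 1 - (k : Int)) = (m : Int) from by omega,
          show ((l.length : Int) - 1) = (k : Int) + (m : Int) from by omega,
          Int.toNat_natCast]
      have hloop := loop_pos l k m hmk
      simp only at hloop
      rw [hloop, show m + 1 = l.length - k from by omega, all_eq_slice l k hkl,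
          PySem.List.slice_from_natCast, PySem.List.slice_to_neg_natCast l k hk0]

-- ===== VERDICT (by name: the statement is the Claim_ definition above) =====
theorem IsSubKey_spec : Claim_equal_IsSubKey := by
  intro key keySize _ hpre
  unfold Spec_IsSubKey IsSubKey IsSubKey_alt
  simp only [PySem.Str.len_eq]
  exact main_eq key.toList keySize hpre
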